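-- pv_equiv track=rewrite | github.com/aubamedany/Space-Joint-Width | preprocess.py | get_unique_pixel_upper
-- ===== SOURCE A (Python) =====
-- def get_unique_pixel_upper(lst):
--     new_lst = []
--     unique_set = set()
--     for ele in reversed(lst):
--         if ele[0] not in unique_set:
--             unique_set.add(ele[0])
--             new_lst.append(ele)
--     return sorted(new_lst, key=lambda x: x[0])
-- ===== SOURCE B (Python) =====
-- def get_unique_pixel_upper(lst):
--     out = []
--     for ele in sorted(lst, key=lambda x: x[0]):
--         if out and out[-1][0] == ele[0]:
--             out[-1] = ele
--         else:
--             out.append(ele)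
--     return out
-- ===== Notes on version B (the rewrite author's own statement) =====
-- stated objective: alternative
-- what changed: Instead of a reversed scan with a seen-set followed by a sort, B sorts the whole list first (stable sort groups equal first components in original order) and then makes one adjacent-merge pass that overwrites the previous entry when its key repeats, so the last occurrence per key survives with no auxiliary set.
import Mathlib
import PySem

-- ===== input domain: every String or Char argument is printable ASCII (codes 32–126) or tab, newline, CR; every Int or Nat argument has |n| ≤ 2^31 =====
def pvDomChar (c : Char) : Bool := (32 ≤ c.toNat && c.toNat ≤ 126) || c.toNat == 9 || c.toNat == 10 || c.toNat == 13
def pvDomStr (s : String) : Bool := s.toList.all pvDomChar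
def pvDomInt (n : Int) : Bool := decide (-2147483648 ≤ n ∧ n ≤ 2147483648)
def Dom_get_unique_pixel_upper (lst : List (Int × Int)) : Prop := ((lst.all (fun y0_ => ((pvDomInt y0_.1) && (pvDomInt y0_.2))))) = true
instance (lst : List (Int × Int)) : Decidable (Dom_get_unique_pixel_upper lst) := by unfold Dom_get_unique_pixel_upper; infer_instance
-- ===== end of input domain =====

-- B sorts the whole list first (stable sort keeps equal keys in original order) and then
-- makes one adjacent-merge pass, overwriting the previous entry when its key repeats, so the
-- last occurrence of each key survives; A dedups with a seen-set over the reversed list and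
-- sorts afterwards. Objective: alternative (same asymptotic cost, no auxiliary set).

-- ===== PORT A =====
-- the 'for ele in reversed(lst): if ele[0] not in unique_set: …' loop
def pvLoopA : PySem.Set Int → List (Int × Int) → List (Int × Int) → List (Int × Int)
  | _, new_lst, [] => new_lst
  | unique_set, new_lst, ele :: rest =>
      if ¬ (unique_set.contains ele.1) then
        pvLoopA (unique_set.add ele.1) (new_lst ++ [ele]) rest
      else
        pvLoopA unique_set new_lst rest

def get_unique_pixel_upper (lst : List (Int × Int)) : List (Int × Int) :=
  PySem.List.sorted (pvLoopA PySem.Set.empty [] lst.reverse) (fun x => x.1) false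

-- ===== PORT B =====
-- one step of the merge pass: 'if out and out[-1][0] == ele[0]: out[-1] = ele else: out.append(ele)'
def pvStepB (out : List (Int × Int)) (ele : Int × Int) : List (Int × Int) :=
  if out.getLast?.map (fun q => q.1) = some ele.1 then out.dropLast ++ [ele] else out ++ [ele]

def get_unique_pixel_upper_alt (lst : List (Int × Int)) : List (Int × Int) :=
  (PySem.List.sorted lst (fun x => x.1) false).foldl pvStepB []

-- ===== PRECONDITION & SPEC =====
def Spec_get_unique_pixel_upper (lst : List (Int × Int)) (out : List (Int × Int)) : Prop := out = get_unique_pixel_upper_alt lst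
instance (lst : List (Int × Int)) (out : List (Int × Int)) : Decidable (Spec_get_unique_pixel_upper lst out) := by unfold Spec_get_unique_pixel_upper; infer_instance

-- ===== CLAIM (what is proved, stated in full; the proofs are below) =====
def Claim_equal_get_unique_pixel_upper : Prop := ∀ (lst : List (Int × Int)), Dom_get_unique_pixel_upper lst → Spec_get_unique_pixel_upper lst (get_unique_pixel_upper lst)

-- ===== LEMMAS AND PROOFS =====

-- membership in A's accumulator: the first hit in the reversed list
lemma pv_mem_loopA (ys : List (Int × Int)) :
    ∀ (s : PySem.Set Int) (acc : List (Int × Int)) (p : Int × Int),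
      p ∈ pvLoopA s acc ys ↔
        p ∈ acc ∨ (p.1 ∉ s ∧ ys.find? (fun q => q.1 == p.1) = some p) := by
  induction ys with
  | nil => intro s acc p; simp [pvLoopA]
  | cons e rest ih =>
      intro s acc p
      simp only [pvLoopA]
      by_cases hc : e.1 ∈ s
      · rw [if_neg (by simpa [PySem.Set.contains_iff] using hc), ih]
        constructor
        · rintro (h | ⟨h1, h2⟩)
          · exact Or.inl h
          · refine Or.inr ⟨h1, ?_⟩
            have hne : (e.1 == p.1) = false := by
              simp only [beq_eq_false_iff_ne, ne_eq]
              intro heq; exact h1 (heq ▸ hc)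
            simp [hne, h2]
        · rintro (h | ⟨h1, h2⟩)
          · exact Or.inl h
          · have hne : (e.1 == p.1) = false := by
              simp only [beq_eq_false_iff_ne, ne_eq]
              intro heq; exact h1 (heq ▸ hc)
            rw [List.find?_cons, hne] at h2
            exact Or.inr ⟨h1, h2⟩
      · rw [if_pos (by simpa [PySem.Set.contains_iff] using hc), ih]
        by_cases hk : e.1 = p.1
        · have hadd : p.1 ∈ s.add e.1 := (PySem.Set.mem_add s e.1 p.1).mpr (Or.inr hk.symm)
          have hfind : (e :: rest).find? (fun q => q.1 == p.1) = some e := by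
            simp [hk]
          constructor
          · rintro (h | ⟨h1, _⟩)
            · rcases List.mem_append.mp h with h' | h'
              · exact Or.inl h'
              · have hpe : p = e := by simpa using h'
                exact Or.inr ⟨by rw [← hk] at *; exact hc, by rw [hfind, hpe]⟩
            · exact absurd hadd h1
          · rintro (h | ⟨h1, h2⟩)
            · exact Or.inl (List.mem_append.mpr (Or.inl h))
            · rw [hfind] at h2
              have hpe : p = e := by injection h2 with h'; exact h'.symm
              exact Or.inl (List.mem_append.mpr (Or.inr (by simp [hpe])))
        · have hne : (e.1 == p.1) = false := by simpa using hk
          have hadd : p.1 ∈ s.add e.1 ↔ p.1 ∈ s := by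
            rw [PySem.Set.mem_add]
            constructor
            · rintro (h | h)
              · exact h
              · exact absurd h.symm hk
            · exact Or.inl
          constructor
          · rintro (h | ⟨h1, h2⟩)
            · rcases List.mem_append.mp h with h' | h'
              · exact Or.inl h'
              · have hpe : p = e := by simpa using h'
                exact absurd (congrArg Prod.fst hpe).symm hk
            · exact Or.inr ⟨fun hm => h1 (hadd.mpr hm), by simp [hne, h2]⟩
          · rintro (h | ⟨h1, h2⟩)
            · exact Or.inl (List.mem_append.mpr (Or.inl h))
            · rw [List.find?_cons, hne] at h2
              exact Or.inr ⟨fun hm => h1 (hadd.mp hm), h2⟩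

-- A's accumulator has pairwise-distinct first components
lemma pv_loopA_fst_nodup (ys : List (Int × Int)) :
    ∀ (s : PySem.Set Int) (acc : List (Int × Int)),
      (acc.map (·.1)).Nodup → (∀ q ∈ acc, q.1 ∈ s) →
      ((pvLoopA s acc ys).map (·.1)).Nodup := by
  induction ys with
  | nil => intro s acc h _; simpa [pvLoopA] using h
  | cons e rest ih =>
      intro s acc hnd hcov
      simp only [pvLoopA]
      by_cases hc : e.1 ∈ s
      · rw [if_neg (by simpa [PySem.Set.contains_iff] using hc)]
        exact ih s acc hnd hcov
      · rw [if_pos (by simpa [PySem.Set.contains_iff] using hc)]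
        apply ih
        · rw [List.map_append]
          refine List.Nodup.append hnd (by simp) ?_
          intro a ha hb
          rcases List.mem_map.mp ha with ⟨q, hq, hqa⟩
          simp only [List.map_cons, List.map_nil, List.mem_singleton] at hb
          apply hc
          rw [← hb, ← hqa] at *
          exact hcov q hq
        · intro q hq
          rcases List.mem_append.mp hq with h' | h'
          · exact (PySem.Set.mem_add s e.1 q.1).mpr (Or.inl (hcov q h'))
          · have : q = e := by simpa using h'
            exact (PySem.Set.mem_add s e.1 q.1).mpr (Or.inr (by rw [this]))

-- STABILITY of the library sort: filtering one key commutes with sorting.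
lemma pv_filter_insertBy (k : Int) (x : Int × Int) (ys : List (Int × Int))
    (hys : ys.Pairwise (fun a b => a.1 ≤ b.1)) :
    (PySem.List.insertBy (fun a b => decide (a.1 < b.1)) x ys).filter (fun q => q.1 == k) =
      if x.1 == k then ys.filter (fun q => q.1 == k) ++ [x] else ys.filter (fun q => q.1 == k) := by
  induction ys with
  | nil => simp only [PySem.List.insertBy]; by_cases h : x.1 = k <;> simp [h]
  | cons y ys ih =>
      rw [List.pairwise_cons] at hys
      simp only [PySem.List.insertBy]
      by_cases hlt : x.1 < y.1
      · rw [if_pos (by simpa using hlt)]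
        by_cases hk : x.1 = k
        · have hy : (y.1 == k) = false := by simp; omega
          have hrest : ys.filter (fun q => q.1 == k) = [] := by
            apply List.filter_eq_nil_iff.mpr
            intro q hq
            have := hys.1 q hq
            simp; omega
          simp [hk, hy, hrest]
        · have hxk : (x.1 == k) = false := by simpa using hk
          simp [hxk]
      · rw [if_neg (by simpa using hlt)]
        rw [List.filter_cons, List.filter_cons, ih hys.2]
        split_ifs <;> simp

lemma pv_sorted_filter (lst : List (Int × Int)) (k : Int) :
    (PySem.List.sorted lst (fun x => x.1) false).filter (fun q => q.1 == k) =
      lst.filter (fun q => q.1 == k) := by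
  induction lst using List.reverseRecOn with
  | nil => simp [PySem.List.sorted]
  | append_singleton t e ih =>
      have hs : PySem.List.sorted (t ++ [e]) (fun x => x.1) false =
          PySem.List.insertBy (fun a b => decide (a.1 < b.1)) e
            (PySem.List.sorted t (fun x => x.1) false) := by
        rw [PySem.List.sorted_eq_foldl_insertBy, PySem.List.sorted_eq_foldl_insertBy,
          List.foldl_append, List.foldl_cons, List.foldl_nil]
      rw [hs, pv_filter_insertBy k e _ (PySem.List.sorted_pairwise t (fun x => x.1)), ih,
        List.filter_append, List.filter_cons]
      split_ifs <;> simp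

-- last hit of key k is the same element in the sorted list as in the original
lemma pv_rev_find (lst : List (Int × Int)) (k : Int) :
    (PySem.List.sorted lst (fun x => x.1) false).reverse.find? (fun q => q.1 == k) =
      lst.reverse.find? (fun q => q.1 == k) := by
  rw [← List.head?_filter, ← List.head?_filter, List.filter_reverse, List.filter_reverse,
    pv_sorted_filter]

-- in a ≤-sorted nonempty list every key is at most the last key
lemma pv_le_getLast (t : List (Int × Int)) (htne : t ≠ [])
    (ht : t.Pairwise (fun a b => a.1 ≤ b.1)) :
    ∀ q ∈ t, q.1 ≤ (t.getLast htne).1 := by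
  intro q hq
  have hpw := ht
  rw [← List.dropLast_append_getLast htne] at hpw hq
  rw [List.pairwise_append] at hpw
  rcases List.mem_append.mp hq with hd | hl'
  · exact hpw.2.2 q hd _ (by simp)
  · have : q = t.getLast htne := by simpa using hl'
    rw [this]

-- B's merge pass over a sorted list: last key, strict sortedness, and membership.
lemma pv_foldB_props (s : List (Int × Int)) (hs : s.Pairwise (fun a b => a.1 ≤ b.1)) :
    ((s.foldl pvStepB []).getLast?.map (fun q => q.1) = s.getLast?.map (fun q => q.1)) ∧
    ((s.foldl pvStepB []).Pairwise (fun a b => a.1 < b.1)) ∧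
    (∀ p, p ∈ s.foldl pvStepB [] ↔ s.reverse.find? (fun q => q.1 == p.1) = some p) := by
  induction s using List.reverseRecOn with
  | nil => simp
  | append_singleton t e ih =>
      have ht : t.Pairwise (fun a b => a.1 ≤ b.1) := hs.sublist (List.sublist_append_left t [e])
      have hle : ∀ y ∈ t, y.1 ≤ e.1 := by
        intro y hy
        exact (List.pairwise_append.mp hs).2.2 y hy e (by simp)
      obtain ⟨h1, h2, h3⟩ := ih ht
      rw [List.foldl_append, List.foldl_cons, List.foldl_nil]
      by_cases htne : t = []
      · subst htne
        refine ⟨by simp [pvStepB], by simp [pvStepB], ?_⟩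
        intro p
        simp only [pvStepB, List.foldl_nil]
        rw [if_neg (by simp)]
        constructor
        · intro h
          have hpe : p = e := by simpa using h
          subst hpe; simp
        · intro h
          have := List.mem_of_find?_eq_some h
          simpa using this
      · have hmemt : ∀ q ∈ t.foldl pvStepB [], q ∈ t := by
          intro q hq
          have := (h3 q).mp hq
          have := List.mem_of_find?_eq_some this
          simpa using this
        have hlast : t.getLast? = some (t.getLast htne) := List.getLast?_eq_some_getLast htne
        set l := t.getLast htne with hl
        have hDne : t.foldl pvStepB [] ≠ [] := by
          intro h0; rw [h0] at h1; rw [hlast] at h1; simp at h1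
        have hDlast? : (t.foldl pvStepB []).getLast? = some ((t.foldl pvStepB []).getLast hDne) :=
          List.getLast?_eq_some_getLast hDne
        set L := (t.foldl pvStepB []).getLast hDne with hL
        have hLkey : L.1 = l.1 := by
          rw [hDlast?, hlast] at h1; simpa using h1
        have htrev : t.reverse = l :: t.dropLast.reverse := by
          conv_lhs => rw [← List.dropLast_append_getLast htne]
          simp [hl]
        have hLmem : L ∈ t.foldl pvStepB [] := List.getLast_mem hDne
        have hLl : L = l := by
          have := (h3 L).mp hLmem
          rw [htrev, List.find?_cons_of_pos (by simp [hLkey])] at this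
          injection this with h'; exact h'.symm
        have hDsplit : t.foldl pvStepB [] = (t.foldl pvStepB []).dropLast ++ [L] :=
          (List.dropLast_append_getLast hDne).symm
        have hdropkey : ∀ q ∈ (t.foldl pvStepB []).dropLast, q.1 < L.1 := by
          intro q hq
          have hpw := h2
          rw [hDsplit, List.pairwise_append] at hpw
          exact hpw.2.2 q hq L (by simp)
        by_cases hke : l.1 = e.1
        · -- repeated key: the pass replaces the last element
          have hcond : (t.foldl pvStepB []).getLast?.map (fun q => q.1) = some e.1 := by
            rw [hDlast?]; simp [hLkey, hke]
          rw [show pvStepB (t.foldl pvStepB []) e = (t.foldl pvStepB []).dropLast ++ [e] from by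
            simp only [pvStepB]; rw [if_pos hcond]]
          refine ⟨by simp, ?_, ?_⟩
          · rw [List.pairwise_append]
            refine ⟨h2.sublist (List.dropLast_sublist _), by simp, ?_⟩
            intro a ha b hb
            simp only [List.mem_singleton] at hb
            subst hb
            have := hdropkey a ha
            omega
          · intro p
            rw [List.mem_append, List.reverse_append, List.reverse_singleton,
              List.singleton_append]
            by_cases hp : e.1 = p.1
            · rw [List.find?_cons_of_pos (by simpa using hp)]
              constructor
              · rintro (hd | hp')
                · exfalso
                  have hpD : p ∈ t.foldl pvStepB [] := by
                    rw [hDsplit]; exact List.mem_append_left _ hd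
                  have hfind := (h3 p).mp hpD
                  rw [htrev, List.find?_cons_of_pos (by simp [hke, hp])] at hfind
                  have hpl : p = l := by injection hfind with h'; exact h'.symm
                  have := hdropkey p hd
                  rw [hpl, hLl] at this; omega
                · simp only [List.mem_singleton] at hp'; rw [hp']
              · intro h; injection h with h; exact Or.inr (by simp [h])
            · rw [List.find?_cons_of_neg (by simpa using hp), ← h3 p]
              constructor
              · rintro (hd | hp')
                · rw [hDsplit]; exact List.mem_append_left _ hd
                · exfalso; simp only [List.mem_singleton] at hp'
                  rw [hp'] at hp; exact hp rfl
              · intro hpD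
                rw [hDsplit] at hpD
                rcases List.mem_append.mp hpD with hd | hL'
                · exact Or.inl hd
                · exfalso
                  have : p = L := by simpa using hL'
                  rw [this, hLkey, hke] at hp; exact hp rfl
        · -- fresh key: the pass appends
          have hkey_lt : ∀ q ∈ t.foldl pvStepB [], q.1 < e.1 := by
            intro q hq
            have hqt : q ∈ t := hmemt q hq
            have hql : q.1 ≤ l.1 := pv_le_getLast t htne ht q hqt
            have hll : l.1 ≤ e.1 := hle l (List.getLast_mem htne)
            omega
          have hcond : ¬ (t.foldl pvStepB []).getLast?.map (fun q => q.1) = some e.1 := by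
            rw [hDlast?]; simp [hLkey]; intro h; exact hke h
          rw [show pvStepB (t.foldl pvStepB []) e = t.foldl pvStepB [] ++ [e] from by
            simp only [pvStepB]; rw [if_neg hcond]]
          refine ⟨by simp, ?_, ?_⟩
          · rw [List.pairwise_append]
            exact ⟨h2, by simp, fun a ha b hb => by
              simp only [List.mem_singleton] at hb; subst hb; exact hkey_lt a ha⟩
          · intro p
            rw [List.mem_append, List.reverse_append, List.reverse_singleton,
              List.singleton_append]
            by_cases hp : e.1 = p.1
            · rw [List.find?_cons_of_pos (by simpa using hp)]
              constructor
              · rintro (hD | hp')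
                · exfalso; have := hkey_lt p hD; omega
                · simp only [List.mem_singleton] at hp'; rw [hp']
              · intro h; injection h with h; exact Or.inr (by simp [h])
            · rw [List.find?_cons_of_neg (by simpa using hp), ← h3 p]
              constructor
              · rintro (hD | hp')
                · exact hD
                · exfalso; simp only [List.mem_singleton] at hp'
                  rw [hp'] at hp; exact hp rfl
              · exact Or.inl

-- ===== VERDICT (by name: the statement is the Claim_ definition above) =====
theorem get_unique_pixel_upper_spec : Claim_equal_get_unique_pixel_upper := by
  intro lst _
  unfold Spec_get_unique_pixel_upper get_unique_pixel_upper get_unique_pixel_upper_alt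
  set accA := pvLoopA PySem.Set.empty [] lst.reverse with hacc
  set s := PySem.List.sorted lst (fun x => x.1) false with hsdef
  obtain ⟨_, hBlt, hBmem⟩ := pv_foldB_props s (PySem.List.sorted_pairwise lst (fun x => x.1))
  apply PySem.List.sorted_eq_of_perm_of_pairwise_lt
  · apply (List.perm_ext_iff_of_nodup ?_ ?_).mpr
    · intro p
      rw [hBmem p, hsdef, pv_rev_find lst p.1, hacc, pv_mem_loopA]
      simp [PySem.Set.empty]
    · exact List.Nodup.of_map (fun q => q.1)
        (List.pairwise_map.mpr (hBlt.imp fun h => ne_of_lt h))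
    · exact List.Nodup.of_map (fun q => q.1)
        (pv_loopA_fst_nodup lst.reverse PySem.Set.empty [] (by simp) (by simp [PySem.Set.empty]))
  · exact hBlt
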